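-- pv_equiv track=rewrite | github.com/nkrot/adventofcode-2020 | day_24/solution.py | spans
-- ===== SOURCE A (Python) =====
-- from typing import List, Union
--
-- def spans(coords: list) -> List[list]:
--     """Inspect given list of coordinates and return spans for every
--     dimension. A span is two values [min, max] -- minimal and maximal value
--     in a dimension.
--     """
--     mins, maxs = [], []
--     for i, coord in enumerate(coords):
--         if i == 0:
--             for v in coord:
--                 mins.append(v)
--                 maxs.append(v)
--         else:
--             for j, v in enumerate(coord):
--                 mins[j] = min(mins[j], v)
--                 maxs[j] = max(maxs[j], v)
--     return list(zip(mins, maxs))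
-- ===== SOURCE B (Python) =====
-- def spans(coords: list):
--     if not coords:
--         return []
--     cols = [[] for _ in coords[0]]
--     for row in coords:
--         for j, v in enumerate(row):
--             cols[j].append(v)
--     return [(min(c), max(c)) for c in cols]
-- ===== Notes on version B (the rewrite author's own statement) =====
-- stated objective: alternative
-- what changed: B replaces A's row-wise pass mutating running mins/maxs by a transpose-then-reduce decomposition: it buckets values into per-dimension columns and reduces each column independently with min()/max().
import Mathlib
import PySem

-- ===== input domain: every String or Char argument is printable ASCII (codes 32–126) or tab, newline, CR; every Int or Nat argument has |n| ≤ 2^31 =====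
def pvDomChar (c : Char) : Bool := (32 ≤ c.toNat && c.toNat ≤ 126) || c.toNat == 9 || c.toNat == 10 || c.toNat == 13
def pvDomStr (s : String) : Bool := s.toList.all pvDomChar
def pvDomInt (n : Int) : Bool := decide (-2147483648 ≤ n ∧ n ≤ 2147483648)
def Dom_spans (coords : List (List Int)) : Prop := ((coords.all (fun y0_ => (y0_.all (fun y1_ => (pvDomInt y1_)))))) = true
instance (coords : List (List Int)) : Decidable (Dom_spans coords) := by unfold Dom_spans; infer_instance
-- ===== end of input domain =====

-- B buckets values into per-dimension columns and reduces each column with min/max, instead of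
-- A's row-wise accumulation of running mins/maxs; objective: an alternative decomposition, same cost.

-- ===== PORT A =====
-- first-row phase: mins.append(v); maxs.append(v)
def pvInitRow (st : List Int × List Int) (coord : List Int) : List Int × List Int :=
  coord.foldl (fun s v => (s.1 ++ [v], s.2 ++ [v])) st

-- one enumerate(coord) step of a later row: mins[j] = min(mins[j], v); maxs[j] = max(maxs[j], v).
-- Python's mins[j] read raises IndexError when j is out of range; the `getD _ 0` read and no-op `set`
-- differ from Python exactly there, and Pre_spans excludes those inputs.
def pvStep (s : List Int × List Int) (jv : Int × Int) : List Int × List Int :=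
  (s.1.set jv.1.toNat (min (s.1.getD jv.1.toNat 0) jv.2),
   s.2.set jv.1.toNat (max (s.2.getD jv.1.toNat 0) jv.2))

def pvUpdRow (st : List Int × List Int) (coord : List Int) : List Int × List Int :=
  (PySem.List.enumerate coord).foldl pvStep st

def spans (coords : List (List Int)) : List (Int × Int) :=
  let st := (PySem.List.enumerate coords).foldl
    (fun st ic => if ic.1 == 0 then pvInitRow st ic.2 else pvUpdRow st ic.2) ([], [])
  st.1.zip st.2

-- ===== PORT B =====
-- for j, v in enumerate(row): cols[j].append(v).  Python's cols[j] raises IndexError when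
-- j ≥ len(cols); the `getD _ []` read and no-op `set` differ from Python exactly there, and
-- Pre_spans excludes those inputs.
def pvBucket (cols : List (List Int)) (row : List Int) : List (List Int) :=
  (PySem.List.enumerate row).foldl
    (fun cs jv => cs.set jv.1.toNat ((cs.getD jv.1.toNat []) ++ [jv.2])) cols

-- cols = [[] for _ in coords[0]]; then the bucket loop; then [(min(c), max(c)) for c in cols]
-- (each column is nonempty — the first row fills every bucket — so the `getD 0` default is never used).
def spans_alt (coords : List (List Int)) : List (Int × Int) :=
  match coords with
  | [] => []
  | r0 :: _ =>
    let cols := coords.foldl pvBucket (r0.map (fun _ => []))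
    cols.map (fun c => ((PySem.List.min? c id).getD 0, (PySem.List.max? c id).getD 0))

-- ===== PRECONDITION & SPEC =====
-- Pre_ excludes exactly the inputs on which both Pythons raise IndexError: some later row is
-- longer than the first row (A's mins/maxs and B's cols only have len(coords[0]) slots).
def Pre_spans (coords : List (List Int)) : Prop :=
  ∀ row ∈ coords, row.length ≤ (coords.headD []).length
instance (coords : List (List Int)) : Decidable (Pre_spans coords) := by unfold Pre_spans; infer_instance

def pvWitness_spans : List (List Int) := [[1, 2], [3, -4], [0, 5]]

def Spec_spans (coords : List (List Int)) (out : List (Int × Int)) : Prop := out = spans_alt coords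
instance (coords : List (List Int)) (out : List (Int × Int)) : Decidable (Spec_spans coords out) := by unfold Spec_spans; infer_instance

-- ===== CLAIM (what is proved, stated in full; the proofs are below) =====
def Claim_equal_spans : Prop := ∀ (coords : List (List Int)), Dom_spans coords → Pre_spans coords → Spec_spans coords (spans coords)

-- ===== LEMMAS AND PROOFS =====

theorem pvInitRow_eq (r : List Int) (xs ys : List Int) :
    pvInitRow (xs, ys) r = (xs ++ r, ys ++ r) := by
  induction r generalizing xs ys with
  | nil => simp [pvInitRow]
  | cons v r ih => simpa [pvInitRow, List.append_assoc] using ih (xs ++ [v]) (ys ++ [v])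

theorem pv_skip_zero (rest : List (List Int)) (k : Int) (hk : 0 < k)
    (st : List Int × List Int) :
    (PySem.List.enumerate rest k).foldl
      (fun st ic => if ic.1 == 0 then pvInitRow st ic.2 else pvUpdRow st ic.2) st
      = rest.foldl pvUpdRow st := by
  induction rest generalizing k st with
  | nil => simp [PySem.List.enumerate_nil]
  | cons r rest ih =>
    have hne : (k == (0 : Int)) = false := by simp; omega
    simp only [PySem.List.enumerate_cons, List.foldl_cons, hne]
    exact ih (k + 1) (by omega) _

theorem pvRow_len (r : List Int) (k : Int) (m M : List Int) :
    ((PySem.List.enumerate r k).foldl pvStep (m, M)).1.length = m.length ∧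
    ((PySem.List.enumerate r k).foldl pvStep (m, M)).2.length = M.length := by
  induction r generalizing k m M with
  | nil => simp [PySem.List.enumerate_nil]
  | cons v r ih =>
    simp only [PySem.List.enumerate_cons, List.foldl_cons, pvStep]
    constructor
    · rw [(ih (k + 1) _ _).1]; simp
    · rw [(ih (k + 1) _ _).2]; simp

theorem pvRow_fst (r : List Int) (k : Nat) (m M : List Int) (j : Nat) :
    ((PySem.List.enumerate r (k : Int)).foldl pvStep (m, M)).1[j]? =
      if k ≤ j ∧ j - k < r.length then (m[j]?).map (fun a => min a (r.getD (j - k) 0))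
      else m[j]? := by
  induction r generalizing k m M with
  | nil =>
    simp only [PySem.List.enumerate_nil, List.foldl_nil, List.length_nil]
    rw [if_neg (by omega)]
  | cons v r ih =>
    simp only [PySem.List.enumerate_cons, List.foldl_cons, pvStep]
    have hcast : ((k : Int) + 1) = ((k + 1 : Nat) : Int) := by push_cast; ring
    rw [hcast, ih (k + 1)]
    simp only [Int.toNat_natCast]
    rcases Nat.lt_trichotomy j k with hjk | hjk | hjk
    · rw [if_neg (by omega), if_neg (by omega), List.getElem?_set_ne (by omega)]
    · subst hjk
      rw [if_neg (by omega), if_pos (by simp only [List.length_cons]; omega)]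
      by_cases hm : j < m.length
      · rw [List.getElem?_set_self hm]
        have h1 : m[j]? = some m[j] := List.getElem?_eq_getElem hm
        simp [h1]
      · have h1 : m[j]? = none := List.getElem?_eq_none (by omega)
        simp [h1]
        omega
    · rw [List.getElem?_set_ne (by omega)]
      have heq : (k ≤ j ∧ j - k < r.length + 1) ↔ (k + 1 ≤ j ∧ j - (k + 1) < r.length) := by omega
      simp only [List.length_cons, heq]
      by_cases hc : k + 1 ≤ j ∧ j - (k + 1) < r.length
      · rw [if_pos hc, if_pos hc]
        have : j - k = (j - (k + 1)) + 1 := by omega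
        rw [this, List.getD_cons_succ]
      · rw [if_neg hc, if_neg hc]

theorem pvRow_snd (r : List Int) (k : Nat) (m M : List Int) (j : Nat) :
    ((PySem.List.enumerate r (k : Int)).foldl pvStep (m, M)).2[j]? =
      if k ≤ j ∧ j - k < r.length then (M[j]?).map (fun a => max a (r.getD (j - k) 0))
      else M[j]? := by
  induction r generalizing k m M with
  | nil =>
    simp only [PySem.List.enumerate_nil, List.foldl_nil, List.length_nil]
    rw [if_neg (by omega)]
  | cons v r ih =>
    simp only [PySem.List.enumerate_cons, List.foldl_cons, pvStep]
    have hcast : ((k : Int) + 1) = ((k + 1 : Nat) : Int) := by push_cast; ring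
    rw [hcast, ih (k + 1)]
    simp only [Int.toNat_natCast]
    rcases Nat.lt_trichotomy j k with hjk | hjk | hjk
    · rw [if_neg (by omega), if_neg (by omega), List.getElem?_set_ne (by omega)]
    · subst hjk
      rw [if_neg (by omega), if_pos (by simp only [List.length_cons]; omega)]
      by_cases hm : j < M.length
      · rw [List.getElem?_set_self hm]
        have h1 : M[j]? = some M[j] := List.getElem?_eq_getElem hm
        simp [h1]
      · have h1 : M[j]? = none := List.getElem?_eq_none (by omega)
        simp [h1]
        omega
    · rw [List.getElem?_set_ne (by omega)]
      have heq : (k ≤ j ∧ j - k < r.length + 1) ↔ (k + 1 ≤ j ∧ j - (k + 1) < r.length) := by omega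
      simp only [List.length_cons, heq]
      by_cases hc : k + 1 ≤ j ∧ j - (k + 1) < r.length
      · rw [if_pos hc, if_pos hc]
        have : j - k = (j - (k + 1)) + 1 := by omega
        rw [this, List.getD_cons_succ]
      · rw [if_neg hc, if_neg hc]

theorem pvFold_len (rest : List (List Int)) (m M : List Int) :
    (rest.foldl pvUpdRow (m, M)).1.length = m.length ∧
    (rest.foldl pvUpdRow (m, M)).2.length = M.length := by
  induction rest generalizing m M with
  | nil => simp
  | cons r rest ih =>
    simp only [List.foldl_cons]
    have h := pvRow_len r 0 m M
    have heta : pvUpdRow (m, M) r = ((pvUpdRow (m, M) r).1, (pvUpdRow (m, M) r).2) := rfl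
    rw [heta]
    rcases ih (pvUpdRow (m, M) r).1 (pvUpdRow (m, M) r).2 with ⟨h1, h2⟩
    exact ⟨h1.trans h.1, h2.trans h.2⟩

theorem pvMain_fst (rest : List (List Int)) (m M : List Int) (j : Nat) (hj : j < m.length) :
    (rest.foldl pvUpdRow (m, M)).1[j]? =
      some ((rest.filterMap (fun row => row[j]?)).foldl min (m.getD j 0)) := by
  induction rest generalizing m M with
  | nil => simp [List.getD_eq_getElem?_getD, List.getElem?_eq_getElem hj]
  | cons r rest ih =>
    simp only [List.foldl_cons]
    have heta : pvUpdRow (m, M) r = ((pvUpdRow (m, M) r).1, (pvUpdRow (m, M) r).2) := rfl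
    rw [heta]
    have hlen : (pvUpdRow (m, M) r).1.length = m.length := (pvRow_len r 0 m M).1
    rw [ih _ _ (by omega)]
    have hfst : (pvUpdRow (m, M) r).1[j]? =
        if 0 ≤ j ∧ j - 0 < r.length then (m[j]?).map (fun a => min a (r.getD (j - 0) 0))
        else m[j]? := pvRow_fst r 0 m M j
    have hmj : m[j]? = some (m.getD j 0) := by
      rw [List.getD_eq_getElem?_getD, List.getElem?_eq_getElem hj]; rfl
    by_cases hr : j < r.length
    · have hrj : r[j]? = some (r.getD j 0) := by
        rw [List.getD_eq_getElem?_getD, List.getElem?_eq_getElem hr]; rfl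
      have : (pvUpdRow (m, M) r).1.getD j 0 = min (m.getD j 0) (r.getD j 0) := by
        rw [List.getD_eq_getElem?_getD, hfst, if_pos (by omega), hmj]; rfl
      rw [this, List.filterMap_cons, hrj, List.foldl_cons]
    · have hrj : r[j]? = none := by simp; omega
      have : (pvUpdRow (m, M) r).1.getD j 0 = m.getD j 0 := by
        rw [List.getD_eq_getElem?_getD, hfst, if_neg (by omega), hmj]; rfl
      rw [this, List.filterMap_cons, hrj]

theorem pvMain_snd (rest : List (List Int)) (m M : List Int) (j : Nat) (hj : j < M.length) :
    (rest.foldl pvUpdRow (m, M)).2[j]? =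
      some ((rest.filterMap (fun row => row[j]?)).foldl max (M.getD j 0)) := by
  induction rest generalizing m M with
  | nil => simp [List.getD_eq_getElem?_getD, List.getElem?_eq_getElem hj]
  | cons r rest ih =>
    simp only [List.foldl_cons]
    have heta : pvUpdRow (m, M) r = ((pvUpdRow (m, M) r).1, (pvUpdRow (m, M) r).2) := rfl
    rw [heta]
    have hlen : (pvUpdRow (m, M) r).2.length = M.length := (pvRow_len r 0 m M).2
    rw [ih _ _ (by omega)]
    have hsnd : (pvUpdRow (m, M) r).2[j]? =
        if 0 ≤ j ∧ j - 0 < r.length then (M[j]?).map (fun a => max a (r.getD (j - 0) 0))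
        else M[j]? := pvRow_snd r 0 m M j
    have hmj : M[j]? = some (M.getD j 0) := by
      rw [List.getD_eq_getElem?_getD, List.getElem?_eq_getElem hj]; rfl
    by_cases hr : j < r.length
    · have hrj : r[j]? = some (r.getD j 0) := by
        rw [List.getD_eq_getElem?_getD, List.getElem?_eq_getElem hr]; rfl
      have : (pvUpdRow (m, M) r).2.getD j 0 = max (M.getD j 0) (r.getD j 0) := by
        rw [List.getD_eq_getElem?_getD, hsnd, if_pos (by omega), hmj]; rfl
      rw [this, List.filterMap_cons, hrj, List.foldl_cons]
    · have hrj : r[j]? = none := by simp; omega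
      have : (pvUpdRow (m, M) r).2.getD j 0 = M.getD j 0 := by
        rw [List.getD_eq_getElem?_getD, hsnd, if_neg (by omega), hmj]; rfl
      rw [this, List.filterMap_cons, hrj]

-- B-side lemmas: one bucket row, then the whole bucket fold gives the transposed columns.
theorem pvBucketRow_get (r : List Int) (k : Nat) (cs : List (List Int)) (j : Nat) :
    ((PySem.List.enumerate r (k : Int)).foldl
        (fun cs jv => cs.set jv.1.toNat ((cs.getD jv.1.toNat []) ++ [jv.2])) cs)[j]? =
      if k ≤ j ∧ j - k < r.length then (cs[j]?).map (fun c => c ++ [r.getD (j - k) 0])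
      else cs[j]? := by
  induction r generalizing k cs with
  | nil =>
    simp only [PySem.List.enumerate_nil, List.foldl_nil, List.length_nil]
    rw [if_neg (by omega)]
  | cons v r ih =>
    simp only [PySem.List.enumerate_cons, List.foldl_cons]
    have hcast : ((k : Int) + 1) = ((k + 1 : Nat) : Int) := by push_cast; ring
    rw [hcast, ih (k + 1)]
    simp only [Int.toNat_natCast]
    rcases Nat.lt_trichotomy j k with hjk | hjk | hjk
    · rw [if_neg (by omega), if_neg (by omega), List.getElem?_set_ne (by omega)]
    · subst hjk
      rw [if_neg (by omega), if_pos (by simp only [List.length_cons]; omega)]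
      by_cases hm : j < cs.length
      · rw [List.getElem?_set_self hm]
        have h1 : cs[j]? = some cs[j] := List.getElem?_eq_getElem hm
        simp [h1]
      · have h1 : cs[j]? = none := List.getElem?_eq_none (by omega)
        simp [h1]
        omega
    · rw [List.getElem?_set_ne (by omega)]
      have heq : (k ≤ j ∧ j - k < r.length + 1) ↔ (k + 1 ≤ j ∧ j - (k + 1) < r.length) := by omega
      simp only [List.length_cons, heq]
      by_cases hc : k + 1 ≤ j ∧ j - (k + 1) < r.length
      · rw [if_pos hc, if_pos hc]
        have : j - k = (j - (k + 1)) + 1 := by omega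
        rw [this, List.getD_cons_succ]
      · rw [if_neg hc, if_neg hc]

theorem pvBucketRow_len (r : List Int) (k : Int) (cs : List (List Int)) :
    ((PySem.List.enumerate r k).foldl
        (fun cs jv => cs.set jv.1.toNat ((cs.getD jv.1.toNat []) ++ [jv.2])) cs).length
      = cs.length := by
  induction r generalizing k cs with
  | nil => simp [PySem.List.enumerate_nil]
  | cons v r ih =>
    simp only [PySem.List.enumerate_cons, List.foldl_cons]
    rw [ih (k + 1)]; simp

theorem pvBuckets_len (rows : List (List Int)) (cs : List (List Int)) :
    (rows.foldl pvBucket cs).length = cs.length := by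
  induction rows generalizing cs with
  | nil => simp
  | cons r rows ih =>
    simp only [List.foldl_cons]
    exact (ih _).trans (pvBucketRow_len r 0 cs)

theorem pvBuckets_get (rows : List (List Int)) (cs : List (List Int)) (j : Nat)
    (hj : j < cs.length) :
    (rows.foldl pvBucket cs)[j]? =
      some (cs.getD j [] ++ rows.filterMap (fun row => row[j]?)) := by
  induction rows generalizing cs with
  | nil => simp [List.getD_eq_getElem?_getD, List.getElem?_eq_getElem hj]
  | cons r rows ih =>
    simp only [List.foldl_cons]
    have hlen : (pvBucket cs r).length = cs.length := pvBucketRow_len r 0 cs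
    rw [ih (pvBucket cs r) (by omega)]
    have hget : (pvBucket cs r)[j]? =
        if 0 ≤ j ∧ j - 0 < r.length then (cs[j]?).map (fun c => c ++ [r.getD (j - 0) 0])
        else cs[j]? := pvBucketRow_get r 0 cs j
    have hcj : cs[j]? = some (cs.getD j []) := by
      rw [List.getD_eq_getElem?_getD, List.getElem?_eq_getElem hj]; rfl
    by_cases hr : j < r.length
    · have hrj : r[j]? = some (r.getD j 0) := by
        rw [List.getD_eq_getElem?_getD, List.getElem?_eq_getElem hr]; rfl
      have : (pvBucket cs r).getD j [] = cs.getD j [] ++ [r.getD j 0] := by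
        rw [List.getD_eq_getElem?_getD, hget, if_pos (by omega), hcj]; rfl
      rw [this, List.filterMap_cons, hrj, List.append_assoc]; rfl
    · have hrj : r[j]? = none := by simp; omega
      have : (pvBucket cs r).getD j [] = cs.getD j [] := by
        rw [List.getD_eq_getElem?_getD, hget, if_neg (by omega), hcj]; rfl
      rw [this, List.filterMap_cons, hrj]

theorem pvMin?_cons (a : Int) (l : List Int) :
    PySem.List.min? (a :: l) id = some (l.foldl min a) := by
  induction l generalizing a with
  | nil => rfl
  | cons x l ih =>
    have h : PySem.List.min? (a :: x :: l) id = PySem.List.min? (min a x :: l) id := by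
      simp only [PySem.List.min?, List.foldl_cons]
      congr 1
      simp only [id_eq]
      rcases le_or_gt a x with h | h
      · rw [if_neg (by omega), min_eq_left h]
      · rw [if_pos h, min_eq_right (by omega)]
    rw [h, ih, List.foldl_cons]

theorem pvMax?_cons (a : Int) (l : List Int) :
    PySem.List.max? (a :: l) id = some (l.foldl max a) := by
  induction l generalizing a with
  | nil => rfl
  | cons x l ih =>
    have h : PySem.List.max? (a :: x :: l) id = PySem.List.max? (max a x :: l) id := by
      simp only [PySem.List.max?, List.foldl_cons]
      congr 1
      simp only [id_eq]
      rcases le_or_gt x a with h | h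
      · rw [if_neg (by omega), max_eq_left h]
      · rw [if_pos h, max_eq_right (by omega)]
    rw [h, ih, List.foldl_cons]

-- ===== VERDICT (by name: the statement is the Claim_ definition above) =====
theorem spans_spec : Claim_equal_spans := by
  unfold Claim_equal_spans
  intro coords _ _
  unfold Spec_spans
  cases coords with
  | nil => rfl
  | cons r0 rest =>
    show spans (r0 :: rest) = spans_alt (r0 :: rest)
    have hA : spans (r0 :: rest) =
        (rest.foldl pvUpdRow (r0, r0)).1.zip (rest.foldl pvUpdRow (r0, r0)).2 := by
      simp only [spans, PySem.List.enumerate_cons, List.foldl_cons, beq_self_eq_true, if_pos]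
      rw [pvInitRow_eq]
      simp only [List.nil_append, zero_add]
      rw [pv_skip_zero rest 1 (by omega)]
    rw [hA]
    apply List.ext_getElem?
    intro i
    have hl1 : (rest.foldl pvUpdRow (r0, r0)).1.length = r0.length := (pvFold_len rest r0 r0).1
    have hl2 : (rest.foldl pvUpdRow (r0, r0)).2.length = r0.length := (pvFold_len rest r0 r0).2
    have hinitlen : (r0.map (fun _ => ([] : List Int))).length = r0.length := by simp
    by_cases hi : i < r0.length
    · have hz : ((rest.foldl pvUpdRow (r0, r0)).1.zip (rest.foldl pvUpdRow (r0, r0)).2)[i]? =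
          some ((rest.foldl pvUpdRow (r0, r0)).1[i], (rest.foldl pvUpdRow (r0, r0)).2[i]) := by
        rw [List.getElem?_eq_getElem (by simp [List.length_zip, hl1, hl2, hi])]
        rw [List.getElem_zip]
      have h1 := pvMain_fst rest r0 r0 i (by omega)
      have h2 := pvMain_snd rest r0 r0 i (by omega)
      have e1 : (rest.foldl pvUpdRow (r0, r0)).1[i] =
          (rest.filterMap (fun row => row[i]?)).foldl min (r0.getD i 0) := by
        have := List.getElem?_eq_getElem (l := (rest.foldl pvUpdRow (r0, r0)).1) (i := i) (by omega)
        rw [this] at h1; exact Option.some.inj h1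
      have e2 : (rest.foldl pvUpdRow (r0, r0)).2[i] =
          (rest.filterMap (fun row => row[i]?)).foldl max (r0.getD i 0) := by
        have := List.getElem?_eq_getElem (l := (rest.foldl pvUpdRow (r0, r0)).2) (i := i) (by omega)
        rw [this] at h2; exact Option.some.inj h2
      have hr0 : r0[i]? = some (r0.getD i 0) := by
        rw [List.getD_eq_getElem?_getD, List.getElem?_eq_getElem hi]; rfl
      have hcols := pvBuckets_get (r0 :: rest) (r0.map (fun _ => [])) i (by omega)
      have hinit : (r0.map (fun _ => ([] : List Int))).getD i [] = [] := by
        rw [List.getD_eq_getElem?_getD, List.getElem?_map, List.getElem?_eq_getElem hi]; rfl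
      rw [hinit, List.nil_append, List.filterMap_cons, hr0] at hcols
      have hrhs : (spans_alt (r0 :: rest))[i]? =
          some (((rest.filterMap (fun row => row[i]?)).foldl min (r0.getD i 0)),
                ((rest.filterMap (fun row => row[i]?)).foldl max (r0.getD i 0))) := by
        simp only [spans_alt]
        rw [List.getElem?_map, hcols]
        simp only [Option.map_some]
        rw [pvMin?_cons, pvMax?_cons]
        rfl
      rw [hz, hrhs, e1, e2]
    · have hz : ((rest.foldl pvUpdRow (r0, r0)).1.zip (rest.foldl pvUpdRow (r0, r0)).2)[i]? = none := by
        simp [List.length_zip, hl1, hl2]; omega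
      have hr : (spans_alt (r0 :: rest))[i]? = none := by
        simp only [spans_alt]
        have hcols0 : ((r0 :: rest).foldl pvBucket (r0.map (fun _ => [])))[i]? = none :=
          List.getElem?_eq_none (by rw [pvBuckets_len]; simp; omega)
        rw [List.getElem?_map, hcols0]; rfl
      rw [hz, hr]
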